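-- pv_equiv track=rewrite | github.com/eddydrew421/populate-product-specs | populate_specs_v2.py | _is_valid_value
-- ===== SOURCE A (Python) =====
-- def _is_valid_value(value: str, max_length: int = 100) -> bool:
--     """Validate extracted value"""
--     if not value or not value.strip():
--         return False
--     value = value.strip()
--
--     # Check length
--     if len(value) > max_length:
--         return False
--
--     # Check for too many special characters
--     special_char_ratio = sum(1 for c in value if not c.isalnum() and c != ' ') / len(value)
--     if special_char_ratio > 0.3:
--         return False
--
--     # Check for nonsensical patterns
--     if value.count(',') > 5 or value.count('.') > 5:
--         return False
--
--     return True
-- ===== SOURCE B (Python) =====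
-- def _is_valid_value(value: str, max_length: int = 100) -> bool:
--     """Validate extracted value: one short-circuiting pass with running counters."""
--     v = value.strip()
--     n = len(v)
--     if n == 0 or n > max_length:
--         return False
--     special = commas = periods = 0
--     for c in v:
--         if c == ',':
--             commas += 1
--             if commas > 5:
--                 return False
--         elif c == '.':
--             periods += 1
--             if periods > 5:
--                 return False
--         if not c.isalnum() and c != ' ':
--             special += 1
--             if special / n > 0.3:
--                 return False
--     return True
-- ===== Notes on version B (the rewrite author's own statement) =====
-- stated objective: alternative
-- what changed: B replaces A's three staged full scans (ratio scan, then two .count() scans) by a single pass over the stripped value that maintains running special/comma/period counters and returns False early the moment any threshold is exceeded; since all counters grow monotonically, the early exit fires exactly when A's end-of-scan checks would fail.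
import Mathlib
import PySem

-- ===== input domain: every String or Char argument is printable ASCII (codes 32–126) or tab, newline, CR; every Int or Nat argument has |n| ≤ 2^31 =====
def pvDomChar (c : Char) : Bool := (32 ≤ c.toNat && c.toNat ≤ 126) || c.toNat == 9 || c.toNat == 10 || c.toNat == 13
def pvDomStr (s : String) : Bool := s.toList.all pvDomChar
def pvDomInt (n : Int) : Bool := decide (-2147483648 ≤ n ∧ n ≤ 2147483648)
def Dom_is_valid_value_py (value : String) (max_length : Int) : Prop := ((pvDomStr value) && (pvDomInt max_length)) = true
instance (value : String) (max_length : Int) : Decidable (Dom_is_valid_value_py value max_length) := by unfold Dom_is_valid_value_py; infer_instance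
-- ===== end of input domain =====

-- B replaces A's three staged scans (ratio scan + two .count() scans) by one
-- short-circuiting pass with running counters (alternative decomposition, same cost).


-- ===== PORT A =====
-- The float comparison special/len > 0.3 is ported exactly as 10*special > 3*len:
-- the two agree for every fraction with denominator far below the half-ulp bound of 0.3's double.
def is_valid_value_py (value : String) (max_length : Int) : Bool :=
  if value = "" ∨ PySem.Str.strip value = "" then false
  else
    let v := PySem.Str.strip value
    if (PySem.Str.len v : Int) > max_length then false
    else
      let special : Int :=
        v.toList.foldl (fun acc c => if !(PySem.Chars.isalnum c) && c != ' ' then acc + 1 else acc) 0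
      if 10 * special > 3 * (PySem.Str.len v : Int) then false
      else if (PySem.Str.count v "," : Int) > 5 ∨ (PySem.Str.count v "." : Int) > 5 then false
      else true

-- ===== PORT B =====
-- B's for-loop with early returns; same float comparison ported as 10*special > 3*n.
def pvLoopB (n : Int) : List Char → Int → Int → Int → Bool
  | [], _, _, _ => true
  | c :: t, special, commas, periods =>
    if c = ',' then
      if commas + 1 > 5 then false
      else
        if !(PySem.Chars.isalnum c) && c != ' ' then
          if 10 * (special + 1) > 3 * n then false
          else pvLoopB n t (special + 1) (commas + 1) periods
        else pvLoopB n t special (commas + 1) periods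
    else if c = '.' then
      if periods + 1 > 5 then false
      else
        if !(PySem.Chars.isalnum c) && c != ' ' then
          if 10 * (special + 1) > 3 * n then false
          else pvLoopB n t (special + 1) commas (periods + 1)
        else pvLoopB n t special commas (periods + 1)
    else
      if !(PySem.Chars.isalnum c) && c != ' ' then
        if 10 * (special + 1) > 3 * n then false
        else pvLoopB n t (special + 1) commas periods
      else pvLoopB n t special commas periods

def is_valid_value_py_alt (value : String) (max_length : Int) : Bool :=
  let v := PySem.Str.strip value
  let n : Int := PySem.Str.len v
  if n = 0 ∨ n > max_length then false
  else pvLoopB n v.toList 0 0 0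

-- ===== PRECONDITION & SPEC =====
def Spec_is_valid_value_py (value : String) (max_length : Int) (out : Bool) : Prop := out = is_valid_value_py_alt value max_length
instance (value : String) (max_length : Int) (out : Bool) : Decidable (Spec_is_valid_value_py value max_length out) := by unfold Spec_is_valid_value_py; infer_instance

-- ===== CLAIM (what is proved, stated in full; the proofs are below) =====
def Claim_equal_is_valid_value_py : Prop := ∀ (value : String) (max_length : Int), Dom_is_valid_value_py value max_length → Spec_is_valid_value_py value max_length (is_valid_value_py value max_length)

-- ===== LEMMAS AND PROOFS =====

-- Python's s.count(sub) for a one-character sub equals the element count.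
lemma count_go_single (c : Char) : ∀ (l : List Char) (fuel acc : Nat), l.length ≤ fuel →
    PySem.Chars.count.go [c] fuel l acc = acc + List.count c l := by
  intro l
  induction l with
  | nil => intro fuel acc _; cases fuel <;> simp [PySem.Chars.count.go]
  | cons h t ih =>
    intro fuel acc hf
    cases fuel with
    | zero => simp at hf
    | succ n =>
      have hlen : t.length ≤ n := by simpa using hf
      by_cases hc : c = h
      · subst hc
        rw [show PySem.Chars.count.go [c] (n + 1) (c :: t) acc
            = PySem.Chars.count.go [c] n t (acc + 1) by
          simp [PySem.Chars.count.go, List.isPrefixOf]]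
        rw [ih n (acc + 1) hlen, List.count_cons_self]
        omega
      · rw [show PySem.Chars.count.go [c] (n + 1) (h :: t) acc
            = PySem.Chars.count.go [c] n t acc by
          simp [PySem.Chars.count.go, List.isPrefixOf, hc]]
        rw [ih n acc hlen]
        simp [Ne.symm hc]

lemma str_count_single (s : String) (c : Char) (sub : String) (hsub : sub.toList = [c]) :
    PySem.Str.count s sub = List.count c s.toList := by
  simp [PySem.Str.count, PySem.Chars.count, hsub]
  rw [show s.length = s.toList.length from String.length_toList.symm]
  simpa using count_go_single c s.toList s.toList.length 0 le_rfl

-- B's short-circuiting loop, started from a not-yet-tripped state, returns true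
-- exactly when the end-of-scan totals satisfy all three thresholds.
lemma loopB_eq (n : Int) : ∀ (xs : List Char) (special commas periods : Int),
    10 * special ≤ 3 * n → commas ≤ 5 → periods ≤ 5 →
    (pvLoopB n xs special commas periods = true ↔
      (10 * (special + (xs.countP (fun c => !(PySem.Chars.isalnum c) && c != ' ') : Int)) ≤ 3 * n
        ∧ commas + (xs.count ',' : Int) ≤ 5
        ∧ periods + (xs.count '.' : Int) ≤ 5)) := by
  intro xs
  induction xs with
  | nil => intro special commas periods hs hc hp; simp [pvLoopB]; omega
  | cons c t ih =>
    intro special commas periods hs hc hp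
    by_cases hcm : c = ','
    · subst hcm
      have hal : PySem.Chars.isalnum ',' = false := by decide
      have hP : ((',' :: t).countP (fun c => !(PySem.Chars.isalnum c) && c != ' ') : Int)
          = (t.countP (fun c => !(PySem.Chars.isalnum c) && c != ' ') : Int) + 1 := by
        rw [List.countP_cons]; simp [hal]
      have hC : ((',' :: t).count ',' : Int) = (t.count ',' : Int) + 1 := by
        rw [List.count_cons_self]; push_cast; ring_nf
      have hD : ((',' :: t).count '.' : Int) = (t.count '.' : Int) := by
        rw [List.count_cons_of_ne (by decide)]
      rw [hP, hC, hD]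
      by_cases h6 : commas + 1 > 5
      · rw [show pvLoopB n (',' :: t) special commas periods = false by
          simp [pvLoopB, h6]]
        simp only [Bool.false_eq_true, false_iff]; omega
      · by_cases hr : 10 * (special + 1) > 3 * n
        · rw [show pvLoopB n (',' :: t) special commas periods = false by
            simp [pvLoopB, h6, hal, hr]]
          simp only [Bool.false_eq_true, false_iff]; omega
        · rw [show pvLoopB n (',' :: t) special commas periods
              = pvLoopB n t (special + 1) (commas + 1) periods by
            simp [pvLoopB, h6, hal, hr]]
          rw [ih (special + 1) (commas + 1) periods (by omega) (by omega) hp]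
          constructor <;> (intro h; refine ⟨by omega, by omega, by omega⟩)
    · by_cases hdot : c = '.'
      · subst hdot
        have hal : PySem.Chars.isalnum '.' = false := by decide
        have hP : (('.' :: t).countP (fun c => !(PySem.Chars.isalnum c) && c != ' ') : Int)
            = (t.countP (fun c => !(PySem.Chars.isalnum c) && c != ' ') : Int) + 1 := by
          rw [List.countP_cons]; simp [hal]
        have hC : (('.' :: t).count ',' : Int) = (t.count ',' : Int) := by
          rw [List.count_cons_of_ne (by decide)]
        have hD : (('.' :: t).count '.' : Int) = (t.count '.' : Int) + 1 := by
          rw [List.count_cons_self]; push_cast; ring_nf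
        rw [hP, hC, hD]
        by_cases h6 : periods + 1 > 5
        · rw [show pvLoopB n ('.' :: t) special commas periods = false by
            simp [pvLoopB, hcm, h6]]
          simp only [Bool.false_eq_true, false_iff]; omega
        · by_cases hr : 10 * (special + 1) > 3 * n
          · rw [show pvLoopB n ('.' :: t) special commas periods = false by
              simp [pvLoopB, hcm, h6, hal, hr]]
            simp only [Bool.false_eq_true, false_iff]; omega
          · rw [show pvLoopB n ('.' :: t) special commas periods
                = pvLoopB n t (special + 1) commas (periods + 1) by
              simp [pvLoopB, hcm, h6, hal, hr]]
            rw [ih (special + 1) commas (periods + 1) (by omega) hc (by omega)]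
            constructor <;> (intro h; refine ⟨by omega, by omega, by omega⟩)
      · have hC : ((c :: t).count ',' : Int) = (t.count ',' : Int) := by
          rw [List.count_cons_of_ne hcm]
        have hD : ((c :: t).count '.' : Int) = (t.count '.' : Int) := by
          rw [List.count_cons_of_ne hdot]
        rw [hC, hD]
        by_cases hsp : (!(PySem.Chars.isalnum c) && c != ' ') = true
        · obtain ⟨hal, hns⟩ : PySem.Chars.isalnum c = false ∧ ¬ c = ' ' := by
            simpa using hsp
          have hP : ((c :: t).countP (fun c => !(PySem.Chars.isalnum c) && c != ' ') : Int)
              = (t.countP (fun c => !(PySem.Chars.isalnum c) && c != ' ') : Int) + 1 := by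
            rw [List.countP_cons, hsp]; push_cast; simp
          rw [hP]
          by_cases hr : 10 * (special + 1) > 3 * n
          · rw [show pvLoopB n (c :: t) special commas periods = false by
              simp [pvLoopB, hcm, hdot, hal, hns, hr]]
            simp only [Bool.false_eq_true, false_iff]; omega
          · rw [show pvLoopB n (c :: t) special commas periods
                = pvLoopB n t (special + 1) commas periods by
              simp [pvLoopB, hcm, hdot, hal, hns, hr]]
            rw [ih (special + 1) commas periods (by omega) hc hp]
            constructor <;> (intro h; refine ⟨by omega, by omega, by omega⟩)
        · have hspf : ((!(PySem.Chars.isalnum c) && c != ' ')) = false := by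
            simpa using hsp
          have hP : ((c :: t).countP (fun c => !(PySem.Chars.isalnum c) && c != ' ') : Int)
              = (t.countP (fun c => !(PySem.Chars.isalnum c) && c != ' ') : Int) := by
            rw [List.countP_cons, hspf]; simp
          rw [hP]
          rw [show pvLoopB n (c :: t) special commas periods
              = pvLoopB n t special commas periods by
            simp only [pvLoopB, if_neg hcm, if_neg hdot, hspf]; simp]
          exact ih special commas periods hs hc hp

-- ===== VERDICT (by name: the statement is the Claim_ definition above) =====
theorem is_valid_value_py_spec : Claim_equal_is_valid_value_py := by
  intro value max_length _
  unfold Spec_is_valid_value_py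
  by_cases h0 : PySem.Str.strip value = ""
  · simp [is_valid_value_py, is_valid_value_py_alt, h0, PySem.Str.len]
  · have hv : ¬ value = "" := fun h => h0 (by rw [h]; decide)
    have hnn : ¬ (PySem.Str.strip value).toList = [] :=
      fun hl => h0 (String.toList_eq_nil_iff.mp hl)
    have hlen : (PySem.Str.len (PySem.Str.strip value) : Int)
        = ((PySem.Str.strip value).toList.length : Int) := by
      simp [PySem.Str.len_eq]
    have hnz : ¬ (PySem.Str.len (PySem.Str.strip value) : Int) = 0 := by
      rw [hlen]
      simpa using hnn
    have hfold := PySem.List.foldl_if_add_one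
      (fun c => !(PySem.Chars.isalnum c) && c != ' ') (PySem.Str.strip value).toList (0 : Int)
    simp only [zero_add] at hfold
    have hcc := str_count_single (PySem.Str.strip value) ',' "," rfl
    have hcd := str_count_single (PySem.Str.strip value) '.' "." rfl
    have hloop := loopB_eq (PySem.Str.len (PySem.Str.strip value))
      (PySem.Str.strip value).toList 0 0 0 (by omega) (by norm_num) (by norm_num)
    simp only [zero_add] at hloop
    simp only [is_valid_value_py, is_valid_value_py_alt, hfold, hcc, hcd]
    rw [if_neg (not_or.mpr ⟨hv, h0⟩)]
    by_cases hmax : (PySem.Str.len (PySem.Str.strip value) : Int) > max_length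
    · rw [if_pos hmax, if_pos (Or.inr hmax)]
    · rw [if_neg hmax, if_neg (not_or.mpr ⟨hnz, hmax⟩)]
      by_cases hA : 10 * (((PySem.Str.strip value).toList.countP
            (fun c => !(PySem.Chars.isalnum c) && c != ' ') : Nat) : Int)
          > 3 * (PySem.Str.len (PySem.Str.strip value) : Int)
      · rw [if_pos hA]
        rcases Bool.eq_false_or_eq_true
            (pvLoopB (PySem.Str.len (PySem.Str.strip value)) (PySem.Str.strip value).toList 0 0 0)
          with h | h
        · exact absurd ((hloop.mp h).1) (by omega)
        · exact h.symm
      · rw [if_neg hA]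
        by_cases hB : (((PySem.Str.strip value).toList.count ',' : Nat) : Int) > 5
            ∨ (((PySem.Str.strip value).toList.count '.' : Nat) : Int) > 5
        · rw [if_pos hB]
          rcases Bool.eq_false_or_eq_true
              (pvLoopB (PySem.Str.len (PySem.Str.strip value)) (PySem.Str.strip value).toList 0 0 0)
            with h | h
          · have := hloop.mp h; exact absurd hB (by push_neg; omega)
          · exact h.symm
        · rw [if_neg hB]
          push_neg at hB
          exact (hloop.mpr ⟨by omega, by omega, by omega⟩).symm
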